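-- pv_equiv track=rewrite | github.com/munch-group/tree-stats | notebooks/kasper_stats.py | get_intermediate_states
-- ===== SOURCE A (Python) =====
-- def get_intermediate_states(all_times, clade_times):
--     clade_times_set = set(clade_times)
--     k, fn = 1, 1
--     intermediate_states = []
--     for t in all_times:
--         k += 1
--         if t in clade_times_set:
--             fn += 1
--             if fn >= 2:
--                 intermediate_states.append((fn, k))
--     return intermediate_states
-- ===== SOURCE B (Python) =====
-- def get_intermediate_states(all_times, clade_times):
--     # Group positions of all_times by value in a dict index, gather the
--     # positions belonging to clade values, sort them, and number with zip/range.
--     index = {}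
--     for pos, t in enumerate(all_times, start=2):
--         index.setdefault(t, []).append(pos)
--     positions = sorted(p for v in set(clade_times) for p in index.get(v, []))
--     return list(zip(range(2, 2 + len(positions)), positions))
-- ===== Notes on version B (the rewrite author's own statement) =====
-- stated objective: alternative
-- what changed: Replaces A's single stateful scan (counters k and fn mutated inline, with a vacuous fn >= 2 guard) by a value-indexed grouping algorithm: build a dict mapping each time value to its list of positions, gather the clade values' position lists, sort the gathered positions, and number them with zip(range(...)).
import Mathlib
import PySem

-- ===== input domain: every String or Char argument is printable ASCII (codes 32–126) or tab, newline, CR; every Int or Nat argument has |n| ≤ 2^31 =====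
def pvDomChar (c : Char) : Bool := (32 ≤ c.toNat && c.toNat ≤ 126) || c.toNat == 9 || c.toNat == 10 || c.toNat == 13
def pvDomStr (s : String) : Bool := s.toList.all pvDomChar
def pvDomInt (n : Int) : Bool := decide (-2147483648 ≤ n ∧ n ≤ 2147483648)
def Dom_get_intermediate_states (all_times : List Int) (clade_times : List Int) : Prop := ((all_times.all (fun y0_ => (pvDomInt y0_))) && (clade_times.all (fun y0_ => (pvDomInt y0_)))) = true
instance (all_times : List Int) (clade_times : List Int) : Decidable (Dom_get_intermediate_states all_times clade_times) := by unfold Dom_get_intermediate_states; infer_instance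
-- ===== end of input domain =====

-- B replaces A's single stateful membership-filtering scan by a value-indexed dict of positions:
-- group all positions by value, gather the clade values' position lists, sort, number (objective: alternative).

-- ===== PORT A =====
def get_intermediate_states (all_times : List Int) (clade_times : List Int) : List (Int × Int) :=
  let clade_times_set : PySem.Set Int := PySem.Set.ofList clade_times
  let st := all_times.foldl (fun (st : Int × Int × List (Int × Int)) t =>
    let k := st.1 + 1
    let fn := st.2.1
    let acc := st.2.2
    if clade_times_set.contains t then
      let fn := fn + 1
      (k, fn, if fn ≥ 2 then acc ++ [(fn, k)] else acc)
    else (k, fn, acc)) (1, 1, ([] : List (Int × Int)))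
  st.2.2

-- ===== PORT B =====
def get_intermediate_states_alt (all_times : List Int) (clade_times : List Int) : List (Int × Int) :=
  -- index.setdefault(t, []).append(pos) == index[t] = index.get(t, []) + [pos] == Dict.modify
  let index : PySem.Dict Int (List Int) :=
    (PySem.List.enumerate all_times 2).foldl
      (fun d p => d.modify p.2 [] (fun l => l ++ [p.1])) PySem.Dict.empty
  -- sorted over the gathered per-value position lists; iteration order of set(clade_times)
  -- is washed out by sorted (no key)
  let positions : List Int :=
    PySem.List.sorted ((PySem.Set.ofList clade_times).flatMap (fun v => index.getD v []))
      (fun x => x) false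
  (PySem.List.pyRange 2 (2 + positions.length) 1).zip positions

-- ===== PRECONDITION & SPEC =====
def Spec_get_intermediate_states (all_times : List Int) (clade_times : List Int) (out : List (Int × Int)) : Prop := out = get_intermediate_states_alt all_times clade_times
instance (all_times : List Int) (clade_times : List Int) (out : List (Int × Int)) : Decidable (Spec_get_intermediate_states all_times clade_times out) := by unfold Spec_get_intermediate_states; infer_instance

-- ===== CLAIM (what is proved, stated in full; the proofs are below) =====
def Claim_equal_get_intermediate_states : Prop := ∀ (all_times : List Int) (clade_times : List Int), Dom_get_intermediate_states all_times clade_times → Spec_get_intermediate_states all_times clade_times (get_intermediate_states all_times clade_times)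

-- ===== LEMMAS AND PROOFS =====

-- A's loop invariant: from state (k0, j0+1, acc) (fn above its initial 1 by j0 ≥ 0, so the fn ≥ 2
-- guard always fires on a match) the fold appends the numbered match positions of xs.
theorem pv_fold_eq (s : PySem.Set Int) (xs : List Int) :
    ∀ (k0 : Int) (fn0 : Int) (acc : List (Int × Int)), 1 ≤ fn0 →
    (xs.foldl (fun (st : Int × Int × List (Int × Int)) t =>
      let k := st.1 + 1
      let fn := st.2.1
      let acc := st.2.2
      if s.contains t then
        let fn := fn + 1
        (k, fn, if fn ≥ 2 then acc ++ [(fn, k)] else acc)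
      else (k, fn, acc)) (k0, fn0, acc)).2.2
    = acc ++ (PySem.List.enumerate
        (((PySem.List.enumerate xs (k0 + 1)).filter (fun p => s.contains p.2)).map (fun p => p.1))
        (fn0 + 1)) := by
  induction xs with
  | nil => intro k0 fn0 acc h; simp [PySem.List.enumerate]
  | cons t ts ih =>
    intro k0 fn0 acc h
    simp only [List.foldl_cons, PySem.List.enumerate_cons, List.filter_cons]
    by_cases hc : s.contains t
    · have hge : fn0 + 1 ≥ 2 := by omega
      simp only [hc, if_pos hge, if_true]
      rw [ih (k0 + 1) (fn0 + 1) (acc ++ [(fn0 + 1, k0 + 1)]) (by omega)]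
      simp [PySem.List.enumerate_cons, List.append_assoc]
    · simp only [hc, if_false, Bool.false_eq_true]
      rw [ih (k0 + 1) fn0 acc h]

-- Grouping invariant for B's dict-building fold.
theorem pv_dict_group (L : List (Int × Int)) :
    ∀ (d : PySem.Dict Int (List Int)) (v : Int),
    (L.foldl (fun d p => d.modify p.2 [] (fun l => l ++ [p.1])) d).getD v []
    = d.getD v [] ++ (L.filter (fun p => p.2 == v)).map (fun p => p.1) := by
  induction L with
  | nil => intro d v; simp
  | cons p L ih =>
    intro d v
    simp only [List.foldl_cons, List.filter_cons]
    by_cases hv : p.2 = v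
    · subst hv
      rw [ih]
      simp [PySem.Dict.getD_modify_self]
    · rw [ih]
      have hb : (p.2 == v) = false := by simpa using hv
      simp only [hb, Bool.false_eq_true, if_false]
      rw [PySem.Dict.getD_modify_of_ne d [] (fun l => l ++ [p.1]) (Ne.symm hv)]

-- Filtering by a disjunction splits into two filters, up to permutation.
theorem pv_filter_or_perm {α : Type} (p q : α → Bool) (h : ∀ x, ¬(p x = true ∧ q x = true)) :
    ∀ L : List α, (L.filter (fun x => p x || q x)).Perm (L.filter p ++ L.filter q) := by
  intro L
  induction L with
  | nil => simp
  | cons x L ih =>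
    simp only [List.filter_cons]
    by_cases hp : p x = true
    · have hq : q x = false := by
        rcases Bool.eq_false_or_eq_true (q x) with h' | h'
        · exact absurd ⟨hp, h'⟩ (h x)
        · exact h'
      simp only [hp, hq, Bool.true_or, if_true, if_false, Bool.false_eq_true]
      exact (ih.cons x)
    · have hp' : p x = false := by simpa using hp
      by_cases hq : q x = true
      · simp only [hp', hq, Bool.false_or, if_true, if_false, Bool.false_eq_true]
        exact ih.cons x |>.trans (List.perm_middle.symm)
      · have hq' : q x = false := by simpa using hq
        simp only [hp', hq', Bool.false_or, if_false, Bool.false_eq_true]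
        exact ih

-- Partition: gathering per-value filters over the distinct values vs, up to permutation,
-- equals one membership filter.
theorem pv_partition_perm (L : List (Int × Int)) :
    ∀ (vs : List Int), vs.Nodup →
    (vs.flatMap (fun v => (L.filter (fun p => p.2 == v)).map (fun p => p.1))).Perm
      ((L.filter (fun p => vs.contains p.2)).map (fun p => p.1)) := by
  intro vs
  induction vs with
  | nil => intro _; simp
  | cons v vs ih =>
    intro hnd
    rcases List.nodup_cons.mp hnd with ⟨hv, hnd'⟩
    simp only [List.flatMap_cons]
    have hsplit : (L.filter (fun p => (v :: vs).contains p.2)).Perm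
        (L.filter (fun p => p.2 == v) ++ L.filter (fun p => vs.contains p.2)) := by
      have hdis : ∀ p : Int × Int, ¬((p.2 == v) = true ∧ (vs.contains p.2) = true) := by
        intro p ⟨h1, h2⟩
        have : p.2 = v := by simpa using h1
        subst this
        exact hv (by simpa using h2)
      have := pv_filter_or_perm (fun p : Int × Int => p.2 == v) (fun p => vs.contains p.2) hdis L
      have hcongr : L.filter (fun p : Int × Int => (v :: vs).contains p.2)
          = L.filter (fun p => (p.2 == v) || vs.contains p.2) := by
        apply List.filter_congr
        intro p _
        by_cases hpv : p.2 = v <;> simp [hpv]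
      rw [hcongr]; exact this
    refine (List.Perm.append_left _ (ih hnd')).trans ?_
    rw [← List.map_append]
    exact (hsplit.map _).symm

-- zip(range(s, s+len(ys)), ys) is enumerate(ys, s).
theorem pv_zip_range_enumerate {α : Type} (ys : List α) :
    ∀ s : Int, (PySem.List.pyRange s (s + ys.length) 1).zip ys = PySem.List.enumerate ys s := by
  induction ys with
  | nil => intro s; simp [PySem.List.pyRange_one_eq_nil, PySem.List.enumerate]
  | cons y ys ih =>
    intro s
    rw [PySem.List.pyRange_one_cons (by simp)]
    simp only [List.zip_cons_cons, PySem.List.enumerate_cons]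
    have : s + (↑(List.length (y :: ys)) : Int) = (s + 1) + ys.length := by simp; ring
    rw [this, ih (s + 1)]

-- ===== VERDICT (by name: the statement is the Claim_ definition above) =====
theorem get_intermediate_states_spec : Claim_equal_get_intermediate_states := by
  intro all_times clade_times _
  unfold Spec_get_intermediate_states get_intermediate_states get_intermediate_states_alt
  dsimp only
  have hA := pv_fold_eq (PySem.Set.ofList clade_times) all_times 1 1 [] le_rfl
  simp only [List.nil_append, show (1:Int)+1 = 2 from rfl] at hA
  rw [hA]
  set E := PySem.List.enumerate all_times 2 with hE
  set S := PySem.Set.ofList clade_times with hS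
  set F := (E.filter (fun p => S.contains p.2)).map (fun p => p.1) with hF
  have hgather : (S.flatMap (fun v =>
      ((E.foldl (fun d p => d.modify p.2 [] (fun l => l ++ [p.1])) PySem.Dict.empty).getD v [])))
      = S.flatMap (fun v => (E.filter (fun p => p.2 == v)).map (fun p => p.1)) := by
    apply List.flatMap_congr
    intro v _
    rw [pv_dict_group E PySem.Dict.empty v]
    simp
  have hperm : (S.flatMap (fun v => (E.filter (fun p => p.2 == v)).map (fun p => p.1))).Perm F :=
    pv_partition_perm E S (PySem.Set.nodup_ofList clade_times)
  have hpw : F.Pairwise (fun a b => a < b) := by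
    have h1 : E.Pairwise (fun p q : Int × Int => p.1 < q.1) := PySem.List.pairwise_lt_enumerate all_times 2
    have h2 := h1.filter (fun p => S.contains p.2)
    rw [hF]
    exact List.pairwise_map.mpr h2
  have hsorted : PySem.List.sorted (S.flatMap (fun v =>
      ((E.foldl (fun d p => d.modify p.2 [] (fun l => l ++ [p.1])) PySem.Dict.empty).getD v [])))
      (fun x => x) false = F := by
    rw [hgather]
    exact PySem.List.sorted_eq_of_perm_of_pairwise_lt _ _ _ hperm.symm hpw
  rw [hsorted, pv_zip_range_enumerate F 2]
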